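-- pv_equiv track=rewrite | github.com/mengjihua/Binary-Battle | 滑动窗口/定长滑动窗口/3694.py | distinctPoints
-- ===== SOURCE A (Python) =====
-- def distinctPoints(s: str, k: int) -> int:
--     n = len(s)
--     preUD = [0] * (n + 1)
--     preLR = [0] * (n + 1)
--
--     for i in range(n):
--         if s[i] == 'U':
--             preUD[i + 1] = preUD[i] + 1
--             preLR[i + 1] = preLR[i]
--         elif s[i] == 'D':
--             preUD[i + 1] = preUD[i] - 1
--             preLR[i + 1] = preLR[i]
--         elif s[i] == 'L':
--             preUD[i + 1] = preUD[i]
--             preLR[i + 1] = preLR[i] - 1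
--         else:
--             preUD[i + 1] = preUD[i]
--             preLR[i + 1] = preLR[i] + 1
--
--     ans = set()
--     for i in range(n - k + 1):
--         ans.add(((preUD[i + k] - preUD[i]), (preLR[i + k] - preLR[i])))
--     return len(ans)
-- ===== SOURCE B (Python) =====
-- def distinctPoints(s: str, k: int) -> int:
--     n = len(s)
--     if k > n:
--         return 0
--
--     def delta(c):
--         if c == 'U':
--             return (1, 0)
--         if c == 'D':
--             return (-1, 0)
--         if c == 'L':
--             return (0, -1)
--         return (0, 1)
--
--     ud = lr = 0
--     for c in s[:k]:
--         du, dl = delta(c)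
--         ud += du
--         lr += dl
--     seen = {(ud, lr)}
--     for i in range(n - k):
--         du, dl = delta(s[i + k])
--         ud += du
--         lr += dl
--         du, dl = delta(s[i])
--         ud -= du
--         lr -= dl
--         seen.add((ud, lr))
--     return len(seen)
-- ===== Notes on version B (the rewrite author's own statement) =====
-- stated objective: alternative
-- what changed: Dropped the two O(n) prefix-sum arrays; B keeps a single running (ud, lr) displacement pair for the current window, seeded from s[:k] and updated in O(1) per slide by the entering and leaving characters, collecting each pair in a set.
import Mathlib
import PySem

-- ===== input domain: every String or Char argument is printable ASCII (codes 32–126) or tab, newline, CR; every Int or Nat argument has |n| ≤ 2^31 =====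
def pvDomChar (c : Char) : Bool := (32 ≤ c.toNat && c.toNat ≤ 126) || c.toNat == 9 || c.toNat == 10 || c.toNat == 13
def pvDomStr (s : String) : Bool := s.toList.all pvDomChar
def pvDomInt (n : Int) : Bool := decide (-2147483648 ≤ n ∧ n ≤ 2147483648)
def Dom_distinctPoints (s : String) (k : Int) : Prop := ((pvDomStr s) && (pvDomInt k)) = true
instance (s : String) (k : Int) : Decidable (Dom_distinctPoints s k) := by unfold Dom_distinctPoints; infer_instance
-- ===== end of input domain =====

-- B replaces A's two prefix-sum arrays by a single running (ud, lr) pair slid across the string (alternative decomposition, same asymptotic cost).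

-- ===== PORT A =====
-- one step of A's array-building loop (state: the two prefix arrays, i the loop index)
def pvStepA (cs : List Char) (st : List Int × List Int) (i : Int) : List Int × List Int :=
  let c := PySem.List.pyGetD cs i ' '
  if c = 'U' then
    (PySem.List.pySetD st.1 (i+1) (PySem.List.pyGetD st.1 i 0 + 1),
     PySem.List.pySetD st.2 (i+1) (PySem.List.pyGetD st.2 i 0))
  else if c = 'D' then
    (PySem.List.pySetD st.1 (i+1) (PySem.List.pyGetD st.1 i 0 - 1),
     PySem.List.pySetD st.2 (i+1) (PySem.List.pyGetD st.2 i 0))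
  else if c = 'L' then
    (PySem.List.pySetD st.1 (i+1) (PySem.List.pyGetD st.1 i 0),
     PySem.List.pySetD st.2 (i+1) (PySem.List.pyGetD st.2 i 0 - 1))
  else
    (PySem.List.pySetD st.1 (i+1) (PySem.List.pyGetD st.1 i 0),
     PySem.List.pySetD st.2 (i+1) (PySem.List.pyGetD st.2 i 0 + 1))

-- body of A's second loop: ans.add((preUD[i+k]-preUD[i], preLR[i+k]-preLR[i]))
def pvAddA (pre : List Int × List Int) (k : Int) (a : PySem.Set (Int × Int)) (i : Int) :
    PySem.Set (Int × Int) :=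
  PySem.Set.add a
    (PySem.List.pyGetD pre.1 (i + k) 0 - PySem.List.pyGetD pre.1 i 0,
     PySem.List.pyGetD pre.2 (i + k) 0 - PySem.List.pyGetD pre.2 i 0)

def distinctPoints (s : String) (k : Int) : Int :=
  let cs := s.toList
  let n : Int := PySem.Str.len s
  let zeros : List Int := List.replicate (n.toNat + 1) 0
  let pre := (PySem.List.pyRange 0 n 1).foldl (pvStepA cs) (zeros, zeros)
  let ans := (PySem.List.pyRange 0 (n - k + 1) 1).foldl (pvAddA pre k) PySem.Set.empty
  PySem.Set.len ans

-- ===== PORT B =====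
def pvDelta (c : Char) : Int × Int :=
  if c = 'U' then (1, 0)
  else if c = 'D' then (-1, 0)
  else if c = 'L' then (0, -1)
  else (0, 1)

-- body of B's sliding loop (state: the running (ud, lr) pair and the set)
def pvStepB (cs : List Char) (k : Int) (st : (Int × Int) × PySem.Set (Int × Int)) (i : Int) :
    (Int × Int) × PySem.Set (Int × Int) :=
  let dIn := pvDelta (PySem.List.pyGetD cs (i + k) ' ')
  let dOut := pvDelta (PySem.List.pyGetD cs i ' ')
  let p := (st.1.1 + dIn.1 - dOut.1, st.1.2 + dIn.2 - dOut.2)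
  (p, PySem.Set.add st.2 p)

def distinctPoints_alt (s : String) (k : Int) : Int :=
  let cs := s.toList
  let n : Int := PySem.Str.len s
  if n < k then 0
  else
    let p0 := (PySem.List.slice cs none (some k)).foldl
      (fun (p : Int × Int) c => (p.1 + (pvDelta c).1, p.2 + (pvDelta c).2)) (0, 0)
    let st := (PySem.List.pyRange 0 (n - k) 1).foldl (pvStepB cs k)
      (p0, PySem.Set.add PySem.Set.empty p0)
    PySem.Set.len st.2

-- ===== PRECONDITION & SPEC =====
-- Pre_ excludes exactly k < 0: there A's second loop always indexes the prefix arrays past the end and raises IndexError.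
def Pre_distinctPoints (s : String) (k : Int) : Prop := 0 ≤ k
instance (s : String) (k : Int) : Decidable (Pre_distinctPoints s k) := by unfold Pre_distinctPoints; infer_instance
def pvWitness_distinctPoints : String × Int := ("UULDR", 2)

def Spec_distinctPoints (s : String) (k : Int) (out : Int) : Prop := out = distinctPoints_alt s k
instance (s : String) (k : Int) (out : Int) : Decidable (Spec_distinctPoints s k out) := by unfold Spec_distinctPoints; infer_instance

-- ===== CLAIM (what is proved, stated in full; the proofs are below) =====
def Claim_equal_distinctPoints : Prop := ∀ (s : String) (k : Int), Dom_distinctPoints s k → Pre_distinctPoints s k → Spec_distinctPoints s k (distinctPoints s k)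

-- ===== LEMMAS AND PROOFS =====

-- net displacement (ud, lr) of the first j characters
def pvPfx (cs : List Char) : Nat → Int × Int
  | 0 => (0, 0)
  | j+1 =>
    let p := pvPfx cs j
    let d := pvDelta (cs.getD j ' ')
    (p.1 + d.1, p.2 + d.2)

-- A's prefix array after m loop iterations: prefixes up to index m, zeros beyond
def pvArr (cs : List Char) (f : Nat → Int) (m : Nat) : List Int :=
  (List.range (m+1)).map f ++ List.replicate (cs.length - m) 0

-- displacement of the window [j, j+K)
def pvW (cs : List Char) (K j : Nat) : Int × Int :=
  ((pvPfx cs (j+K)).1 - (pvPfx cs j).1, (pvPfx cs (j+K)).2 - (pvPfx cs j).2)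

theorem pvArr_getD (cs : List Char) (f : Nat → Int) (m j : Nat) (hj : j ≤ m) :
    (pvArr cs f m).getD j 0 = f j := by
  unfold pvArr
  rw [List.getD_eq_getElem?_getD, List.getElem?_append_left (by simpa using Nat.lt_succ_of_le hj)]
  simp [Nat.lt_succ_of_le hj]

theorem pvArr_set (cs : List Char) (f : Nat → Int) (m : Nat) (hm : m < cs.length) :
    PySem.List.pySetD (pvArr cs f m) ((m : Int) + 1) (f (m+1)) = pvArr cs f (m+1) := by
  have h1 : ((m : Int) + 1) = (((m+1 : Nat)) : Int) := by push_cast; ring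
  rw [h1, PySem.List.pySetD_natCast]
  unfold pvArr
  have hlen : ((List.range (m+1)).map f).length = m + 1 := by simp
  rw [List.set_append_right _ _ (by omega)]
  have hrep : List.replicate (cs.length - m) (0:Int) = 0 :: List.replicate (cs.length - (m+1)) 0 := by
    have : cs.length - m = (cs.length - (m+1)) + 1 := by omega
    rw [this, List.replicate_succ]
  rw [hrep, hlen]
  simp [List.range_succ]

theorem pvBuild (cs : List Char) (m : Nat) (hm : m ≤ cs.length) :
    (List.range m).foldl (fun st (j : Nat) => pvStepA cs st (j : Int))
        (List.replicate (cs.length + 1) 0, List.replicate (cs.length + 1) 0)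
      = (pvArr cs (fun j => (pvPfx cs j).1) m, pvArr cs (fun j => (pvPfx cs j).2) m) := by
  induction m with
  | zero =>
    unfold pvArr
    simp [pvPfx, List.replicate_succ, List.range_succ]
  | succ m ih =>
    rw [List.range_succ, List.foldl_append, ih (by omega)]
    simp only [List.foldl_cons, List.foldl_nil, pvStepA, PySem.List.pyGetD_natCast]
    have hm' : m < cs.length := by omega
    have hp1 : (pvPfx cs (m+1)).1 = (pvPfx cs m).1 + (pvDelta (cs.getD m ' ')).1 := rfl
    have hp2 : (pvPfx cs (m+1)).2 = (pvPfx cs m).2 + (pvDelta (cs.getD m ' ')).2 := rfl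
    rw [pvArr_getD cs (fun j => (pvPfx cs j).1) m m le_rfl,
        pvArr_getD cs (fun j => (pvPfx cs j).2) m m le_rfl]
    generalize hcg : cs.getD m ' ' = c
    rw [hcg] at hp1 hp2
    by_cases hU : c = 'U'
    · rw [if_pos hU]
      have e1 : (pvPfx cs m).1 + 1 = (pvPfx cs (m+1)).1 := by rw [hp1, hU]; simp [pvDelta]
      have e2 : (pvPfx cs m).2 = (pvPfx cs (m+1)).2 := by rw [hp2, hU]; simp [pvDelta]
      rw [e1, e2, pvArr_set _ _ _ hm', pvArr_set _ _ _ hm']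
    · rw [if_neg hU]
      by_cases hD : c = 'D'
      · rw [if_pos hD]
        have e1 : (pvPfx cs m).1 - 1 = (pvPfx cs (m+1)).1 := by
          rw [hp1, hD]; simp [pvDelta]; ring
        have e2 : (pvPfx cs m).2 = (pvPfx cs (m+1)).2 := by rw [hp2, hD]; simp [pvDelta]
        rw [e1, e2, pvArr_set _ _ _ hm', pvArr_set _ _ _ hm']
      · rw [if_neg hD]
        by_cases hL : c = 'L'
        · rw [if_pos hL]
          have e1 : (pvPfx cs m).1 = (pvPfx cs (m+1)).1 := by rw [hp1, hL]; simp [pvDelta]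
          have e2 : (pvPfx cs m).2 - 1 = (pvPfx cs (m+1)).2 := by
            rw [hp2, hL]; simp [pvDelta]; ring
          rw [e1, e2, pvArr_set _ _ _ hm', pvArr_set _ _ _ hm']
        · rw [if_neg hL]
          have e1 : (pvPfx cs m).1 = (pvPfx cs (m+1)).1 := by
            rw [hp1]; simp [pvDelta, hU, hD, hL]
          have e2 : (pvPfx cs m).2 + 1 = (pvPfx cs (m+1)).2 := by
            rw [hp2]; simp [pvDelta, hU, hD, hL]
          rw [e1, e2, pvArr_set _ _ _ hm', pvArr_set _ _ _ hm']

theorem pvPfx_take (cs : List Char) (j : Nat) (hj : j ≤ cs.length) :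
    (cs.take j).foldl (fun (p : Int × Int) c => (p.1 + (pvDelta c).1, p.2 + (pvDelta c).2)) (0, 0)
      = pvPfx cs j := by
  induction j with
  | zero => simp [pvPfx]
  | succ j ih =>
    have hj' : j < cs.length := by omega
    rw [List.take_add_one, List.foldl_append, ih (by omega)]
    simp [pvPfx, List.getD_eq_getElem?_getD, List.getElem?_eq_getElem hj']

theorem pvBInv (cs : List Char) (K m : Nat) (hm : m + K ≤ cs.length) :
    (List.range m).foldl (fun st (j : Nat) => pvStepB cs (K : Int) st (j : Int))
        (pvW cs K 0, PySem.Set.add PySem.Set.empty (pvW cs K 0))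
      = (pvW cs K m,
         (List.range (m+1)).foldl (fun a j => PySem.Set.add a (pvW cs K j)) PySem.Set.empty) := by
  induction m with
  | zero => simp [PySem.Set.empty]
  | succ m ih =>
    rw [List.range_succ, List.foldl_append, ih (by omega)]
    simp only [List.foldl_cons, List.foldl_nil]
    have hin : (m : Int) + (K : Int) = (((m + K : Nat)) : Int) := by push_cast; ring
    have hmK : m + K < cs.length := by omega
    have hm' : m < cs.length := by omega
    unfold pvStepB
    rw [hin, PySem.List.pyGetD_natCast, PySem.List.pyGetD_natCast]
    have hgIn : cs.getD (m+K) ' ' = cs.getD (m+K) ' ' := rfl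
    have hw1 : (pvW cs K m).1 + (pvDelta (cs.getD (m+K) ' ')).1 - (pvDelta (cs.getD m ' ')).1
        = (pvW cs K (m+1)).1 := by
      simp only [pvW]
      have e1 : (pvPfx cs (m+1+K)).1 = (pvPfx cs (m+K)).1 + (pvDelta (cs.getD (m+K) ' ')).1 := by
        have : m+1+K = (m+K)+1 := by omega
        rw [this]; simp [pvPfx]
      have e2 : (pvPfx cs (m+1)).1 = (pvPfx cs m).1 + (pvDelta (cs.getD m ' ')).1 := by
        simp [pvPfx]
      rw [e1, e2]; ring
    have hw2 : (pvW cs K m).2 + (pvDelta (cs.getD (m+K) ' ')).2 - (pvDelta (cs.getD m ' ')).2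
        = (pvW cs K (m+1)).2 := by
      simp only [pvW]
      have e1 : (pvPfx cs (m+1+K)).2 = (pvPfx cs (m+K)).2 + (pvDelta (cs.getD (m+K) ' ')).2 := by
        have : m+1+K = (m+K)+1 := by omega
        rw [this]; simp [pvPfx]
      have e2 : (pvPfx cs (m+1)).2 = (pvPfx cs m).2 + (pvDelta (cs.getD m ' ')).2 := by
        simp [pvPfx]
      rw [e1, e2]; ring
    simp only [hw1, hw2]
    rw [List.range_succ (n := m+1), List.foldl_append]
    simp

-- ===== VERDICT (by name: the statement is the Claim_ definition above) =====
theorem distinctPoints_spec : Claim_equal_distinctPoints := by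
  intro s k _ hk
  unfold Spec_distinctPoints distinctPoints distinctPoints_alt
  have hn : PySem.Str.len s = (s.toList.length : Int) := by simp [PySem.Str.len_eq]
  simp only [hn, Int.toNat_natCast]
  set cs := s.toList with hcs
  by_cases hlt : (cs.length : Int) < k
  · rw [if_pos hlt,
        PySem.List.pyRange_one_eq_nil (a := 0) (b := (cs.length : Int) - k + 1) (by omega)]
    simp [PySem.Set.len, PySem.Set.empty]
  · rw [if_neg hlt]
    obtain ⟨K, rfl⟩ : ∃ K : Nat, k = (K : Int) := ⟨k.toNat, (Int.toNat_of_nonneg hk).symm⟩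
    have hK : K ≤ cs.length := by exact_mod_cast not_lt.mp hlt
    set M := cs.length - K with hM
    -- A's first loop builds the two prefix arrays
    have hbuild : (PySem.List.pyRange 0 ((cs.length : Nat) : Int) 1).foldl (pvStepA cs)
        (List.replicate (cs.length + 1) 0, List.replicate (cs.length + 1) 0)
        = (pvArr cs (fun j => (pvPfx cs j).1) cs.length,
           pvArr cs (fun j => (pvPfx cs j).2) cs.length) := by
      rw [PySem.List.pyRange_one, List.foldl_map]
      have hc : ((cs.length : Int) - 0).toNat = cs.length := by omega
      rw [hc]
      have hz : ∀ (st : List Int × List Int) (j : Nat),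
          pvStepA cs st (0 + (j : Int)) = pvStepA cs st (j : Int) := by
        intro st j; rw [zero_add]
      simp only [hz]
      exact pvBuild cs cs.length le_rfl
    rw [hbuild]
    -- A's second loop collects exactly the window displacements
    have hans : (PySem.List.pyRange 0 ((cs.length : Int) - K + 1) 1).foldl
        (pvAddA (pvArr cs (fun j => (pvPfx cs j).1) cs.length,
                 pvArr cs (fun j => (pvPfx cs j).2) cs.length) (K : Int)) PySem.Set.empty
        = (List.range (M+1)).foldl (fun a j => PySem.Set.add a (pvW cs K j)) PySem.Set.empty := by
      rw [PySem.List.pyRange_one, List.foldl_map]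
      have hc : ((cs.length : Int) - K + 1 - 0).toNat = M + 1 := by omega
      rw [hc]
      apply List.foldl_ext
      intro a j hj
      have hj' : j < M + 1 := List.mem_range.mp hj
      unfold pvAddA pvW
      have h1 : (0 : Int) + (j : Int) + (K : Int) = (((j + K : Nat)) : Int) := by push_cast; ring
      have h2 : (0 : Int) + (j : Int) = ((j : Nat) : Int) := by ring
      rw [h1, h2, PySem.List.pyGetD_natCast, PySem.List.pyGetD_natCast,
          PySem.List.pyGetD_natCast, PySem.List.pyGetD_natCast,
          pvArr_getD cs _ cs.length (j + K) (by omega),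
          pvArr_getD cs _ cs.length (j + K) (by omega),
          pvArr_getD cs _ cs.length j (by omega),
          pvArr_getD cs _ cs.length j (by omega)]
    rw [hans]
    -- B's first loop over s[:k] computes the displacement of the first window
    have hp0 : (PySem.List.slice cs none (some (K : Int))).foldl
        (fun (p : Int × Int) c => (p.1 + (pvDelta c).1, p.2 + (pvDelta c).2)) (0, 0)
        = pvW cs K 0 := by
      have hsl : PySem.List.slice cs none (some ((K : Nat) : Int)) = cs.take K := by
        simp [pysem]
      rw [hsl, pvPfx_take cs K hK]
      simp [pvW, pvPfx]
    rw [hp0]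
    -- B's sliding loop collects the same window displacements
    have hbb : (PySem.List.pyRange 0 ((cs.length : Int) - K) 1).foldl (pvStepB cs (K : Int))
        (pvW cs K 0, PySem.Set.add PySem.Set.empty (pvW cs K 0))
        = (pvW cs K M,
           (List.range (M+1)).foldl (fun a j => PySem.Set.add a (pvW cs K j)) PySem.Set.empty) := by
      rw [PySem.List.pyRange_one, List.foldl_map]
      have hc : ((cs.length : Int) - K - 0).toNat = M := by omega
      rw [hc]
      have hz : ∀ (st : (Int × Int) × PySem.Set (Int × Int)) (j : Nat),
          pvStepB cs (K : Int) st (0 + (j : Int)) = pvStepB cs (K : Int) st (j : Int) := by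
        intro st j; rw [zero_add]
      simp only [hz]
      exact pvBInv cs K M (by omega)
    rw [hbb]
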